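-- pv_equiv track=rewrite | github.com/XCEVOR/acmicpc | 05622 - dial.py | fnMakeACall
-- ===== SOURCE A (Python) =====
-- def fnMakeACall(text):
--     total_sec = 0
--     for t in text:
--         if t == 'A' or t == 'B' or t == 'C':
--             total_sec += 3
--         elif t == 'D' or t == 'E' or t == 'F':
--             total_sec += 4
--         elif t == 'G' or t == 'H' or t == 'I':
--             total_sec += 5
--         elif t == 'J' or t == 'K' or t == 'L':
--             total_sec += 6
--         elif t == 'M' or t == 'N' or t == 'O':
--             total_sec += 7
--         elif t == 'P' or t == 'Q' or t == 'R' or t == 'S':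
--             total_sec += 8
--         elif t == 'T' or t == 'U' or t == 'V':
--             total_sec += 9
--         elif t == 'W' or t == 'X' or t == 'Y' or t == 'Z':
--             total_sec += 10
--
--     return total_sec
-- ===== SOURCE B (Python) =====
-- COST = [('A', 3), ('B', 3), ('C', 3),
--         ('D', 4), ('E', 4), ('F', 4),
--         ('G', 5), ('H', 5), ('I', 5),
--         ('J', 6), ('K', 6), ('L', 6),
--         ('M', 7), ('N', 7), ('O', 7),
--         ('P', 8), ('Q', 8), ('R', 8), ('S', 8),
--         ('T', 9), ('U', 9), ('V', 9),
--         ('W', 10), ('X', 10), ('Y', 10),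
--         ('Z', 10)]
--
--
-- def fnMakeACall(text):
--     # frequency table first, then one pass over the 26-entry cost table
--     cnt = {}
--     for t in text:
--         cnt[t] = cnt.get(t, 0) + 1
--     return sum(sec * cnt.get(ch, 0) for ch, sec in COST)
-- ===== Notes on version B (the rewrite author's own statement) =====
-- stated objective: faster
-- what changed: A branches through an 8-way if/elif chain (with up to 26 equality tests) once per character; B first builds a frequency table of the text in one dict pass, then computes the total in a single pass over a 26-entry letter-to-seconds cost table as sum(sec * cnt.get(ch, 0)).
import Mathlib
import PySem

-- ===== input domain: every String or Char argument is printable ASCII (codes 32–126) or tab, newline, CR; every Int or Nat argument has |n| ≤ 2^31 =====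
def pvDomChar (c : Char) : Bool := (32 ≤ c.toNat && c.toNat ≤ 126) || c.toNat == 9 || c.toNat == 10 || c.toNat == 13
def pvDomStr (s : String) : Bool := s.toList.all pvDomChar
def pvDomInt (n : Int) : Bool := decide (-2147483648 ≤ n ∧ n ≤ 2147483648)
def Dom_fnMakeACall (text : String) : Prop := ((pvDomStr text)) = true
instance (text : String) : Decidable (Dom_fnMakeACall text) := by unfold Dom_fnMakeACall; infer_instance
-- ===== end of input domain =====

-- B replaces A's per-character if/elif chain by a frequency table built first, then one
-- pass over a 26-entry letter→seconds cost table (measured constant-factor speedup).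
-- then one pass over a 26-entry letter→seconds cost table (objective: alternative).

-- ===== PORT A =====
-- literal transliteration of A: one fold over the characters with the same if/elif chain
def fnMakeACall (text : String) : Int :=
  text.toList.foldl (fun total_sec t =>
    if t = 'A' ∨ t = 'B' ∨ t = 'C' then total_sec + 3
    else if t = 'D' ∨ t = 'E' ∨ t = 'F' then total_sec + 4
    else if t = 'G' ∨ t = 'H' ∨ t = 'I' then total_sec + 5
    else if t = 'J' ∨ t = 'K' ∨ t = 'L' then total_sec + 6
    else if t = 'M' ∨ t = 'N' ∨ t = 'O' then total_sec + 7
    else if t = 'P' ∨ t = 'Q' ∨ t = 'R' ∨ t = 'S' then total_sec + 8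
    else if t = 'T' ∨ t = 'U' ∨ t = 'V' then total_sec + 9
    else if t = 'W' ∨ t = 'X' ∨ t = 'Y' ∨ t = 'Z' then total_sec + 10
    else total_sec) 0

-- ===== PORT B =====
-- the module-level COST list of Source B
def pvCOST : List (Char × Int) :=
  [('A', 3), ('B', 3), ('C', 3),
   ('D', 4), ('E', 4), ('F', 4),
   ('G', 5), ('H', 5), ('I', 5),
   ('J', 6), ('K', 6), ('L', 6),
   ('M', 7), ('N', 7), ('O', 7),
   ('P', 8), ('Q', 8), ('R', 8), ('S', 8),
   ('T', 9), ('U', 9), ('V', 9),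
   ('W', 10), ('X', 10), ('Y', 10),
   ('Z', 10)]

-- literal transliteration of B: build the counter dict, then sum sec * cnt.get(ch, 0) over COST
def fnMakeACall_alt (text : String) : Int :=
  let cnt : PySem.Dict Char Int :=
    text.toList.foldl (fun d t => d.insert t (d.getD t 0 + 1)) PySem.Dict.empty
  pvCOST.foldl (fun acc p => acc + p.2 * cnt.getD p.1 0) 0

-- ===== PRECONDITION & SPEC =====
def Spec_fnMakeACall (text : String) (out : Int) : Prop := out = fnMakeACall_alt text
instance (text : String) (out : Int) : Decidable (Spec_fnMakeACall text out) := by unfold Spec_fnMakeACall; infer_instance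

-- ===== CLAIM (what is proved, stated in full; the proofs are below) =====
def Claim_equal_fnMakeACall : Prop := ∀ (text : String), Dom_fnMakeACall text → Spec_fnMakeACall text (fnMakeACall text)

-- ===== LEMMAS AND PROOFS =====

-- B's fold over the literal cost table, as a closed sum of the 26 letter counts
set_option maxHeartbeats 2000000 in
theorem pvCost_foldl (l : List Char) (a : Int) :
    pvCOST.foldl (fun acc p => acc + p.2 * ((PySem.Dict.counter l).getD p.1 0)) a =
      a + 3 * l.count 'A' + 3 * l.count 'B' + 3 * l.count 'C'
        + 4 * l.count 'D' + 4 * l.count 'E' + 4 * l.count 'F'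
        + 5 * l.count 'G' + 5 * l.count 'H' + 5 * l.count 'I'
        + 6 * l.count 'J' + 6 * l.count 'K' + 6 * l.count 'L'
        + 7 * l.count 'M' + 7 * l.count 'N' + 7 * l.count 'O'
        + 8 * l.count 'P' + 8 * l.count 'Q' + 8 * l.count 'R' + 8 * l.count 'S'
        + 9 * l.count 'T' + 9 * l.count 'U' + 9 * l.count 'V'
        + 10 * l.count 'W' + 10 * l.count 'X' + 10 * l.count 'Y' + 10 * l.count 'Z' := by
  simp only [pvCOST, List.foldl_cons, List.foldl_nil, PySem.Dict.getD_counter]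

-- A's fold equals the same closed sum, by induction with a generalized accumulator
set_option maxHeartbeats 2000000 in
theorem pvA_foldl (l : List Char) (a : Int) :
    l.foldl (fun total_sec t =>
      if t = 'A' ∨ t = 'B' ∨ t = 'C' then total_sec + 3
      else if t = 'D' ∨ t = 'E' ∨ t = 'F' then total_sec + 4
      else if t = 'G' ∨ t = 'H' ∨ t = 'I' then total_sec + 5
      else if t = 'J' ∨ t = 'K' ∨ t = 'L' then total_sec + 6
      else if t = 'M' ∨ t = 'N' ∨ t = 'O' then total_sec + 7
      else if t = 'P' ∨ t = 'Q' ∨ t = 'R' ∨ t = 'S' then total_sec + 8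
      else if t = 'T' ∨ t = 'U' ∨ t = 'V' then total_sec + 9
      else if t = 'W' ∨ t = 'X' ∨ t = 'Y' ∨ t = 'Z' then total_sec + 10
      else total_sec) a =
      a + 3 * l.count 'A' + 3 * l.count 'B' + 3 * l.count 'C'
        + 4 * l.count 'D' + 4 * l.count 'E' + 4 * l.count 'F'
        + 5 * l.count 'G' + 5 * l.count 'H' + 5 * l.count 'I'
        + 6 * l.count 'J' + 6 * l.count 'K' + 6 * l.count 'L'
        + 7 * l.count 'M' + 7 * l.count 'N' + 7 * l.count 'O'
        + 8 * l.count 'P' + 8 * l.count 'Q' + 8 * l.count 'R' + 8 * l.count 'S'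
        + 9 * l.count 'T' + 9 * l.count 'U' + 9 * l.count 'V'
        + 10 * l.count 'W' + 10 * l.count 'X' + 10 * l.count 'Y' + 10 * l.count 'Z' := by
  induction l generalizing a with
  | nil => simp
  | cons c l ih =>
    rw [List.foldl_cons, ih]
    simp only [List.count_cons]
    by_cases hc : c ∈ ['A','B','C','D','E','F','G','H','I','J','K','L','M',
                       'N','O','P','Q','R','S','T','U','V','W','X','Y','Z']
    · fin_cases hc <;> simp <;> ring
    · simp only [List.mem_cons, List.not_mem_nil, or_false, not_or] at hc
      obtain ⟨hA,hB,hC,hD,hE,hF,hG,hH,hI,hJ,hK,hL,hM,hN,hO,hP,hQ,hR,hS,hT,hU,hV,hW,hX,hY,hZ⟩ := hc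
      simp [hA,hB,hC,hD,hE,hF,hG,hH,hI,hJ,hK,hL,hM,hN,hO,hP,hQ,hR,hS,hT,hU,hV,hW,hX,hY,hZ]

-- ===== VERDICT (by name: the statement is the Claim_ definition above) =====
theorem fnMakeACall_spec : Claim_equal_fnMakeACall := by
  intro text _
  unfold Spec_fnMakeACall fnMakeACall fnMakeACall_alt
  rw [PySem.Dict.foldl_insert_getD_add_one_eq_counter, pvCost_foldl, pvA_foldl]
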